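-- pv_equiv track=rewrite | github.com/allanbatista/mu-rust | scripts/client_converter/test_obj_decrypt.py | _idea_mul_inverse
-- ===== SOURCE A (Python) =====
-- def _idea_mul_inverse(x):
--     x = x & 0xFFFF
--     if x <= 1:
--         return x
--     t1 = 0x10001 // x
--     y = 0x10001 % x
--     if y == 1:
--         return (0x10001 - t1) & 0xFFFF
--     t0 = 1
--     while y != 1:
--         q = x // y
--         x = x % y
--         t0 = (t0 + q * t1) % 0x10001
--         if x == 1:
--             return t0 & 0xFFFF
--         q2 = y // x
--         y = y % x
--         t1 = (t1 + q2 * t0) % 0x10001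
--     return (0x10001 - t1) & 0xFFFF
-- ===== SOURCE B (Python) =====
-- def _idea_mul_inverse(x):
--     return pow(x & 0xFFFF, 65535, 65537) & 0xFFFF
-- ===== Notes on version B (the rewrite author's own statement) =====
-- stated objective: simpler
-- what changed: Replaces the hand-rolled extended-Euclidean inverse loop with the one-line Fermat closed form pow(x & 0xFFFF, 65535, 65537) & 0xFFFF, valid because 65537 is prime.
import Mathlib
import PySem

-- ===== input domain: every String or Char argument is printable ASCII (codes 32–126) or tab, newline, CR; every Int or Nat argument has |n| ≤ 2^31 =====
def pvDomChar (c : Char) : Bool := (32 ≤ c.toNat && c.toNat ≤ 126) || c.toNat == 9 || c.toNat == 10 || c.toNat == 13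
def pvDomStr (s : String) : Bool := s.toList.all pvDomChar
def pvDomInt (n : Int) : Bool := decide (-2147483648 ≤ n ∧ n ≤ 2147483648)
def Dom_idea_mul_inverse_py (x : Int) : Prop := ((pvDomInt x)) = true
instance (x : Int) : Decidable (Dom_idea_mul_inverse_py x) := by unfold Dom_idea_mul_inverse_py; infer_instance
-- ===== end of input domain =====

-- ===== PORT A =====
-- B replaces A's extended-Euclidean inverse loop by the Fermat closed form pow(x & 0xFFFF, 65535, 65537) & 0xFFFF.
-- Fuel-bounded transcription of A's `while y != 1` loop; fuel 65536 always suffices (x < 65536 and x strictly decreases).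
def ideaLoop : Nat → Int → Int → Int → Int → Int
  | 0, _, _, _, _ => 0
  | fuel+1, x, y, t0, t1 =>
    if y ≠ 1 then
      let q := PySem.Int.floordiv x y
      let x' := PySem.Int.mod x y
      let t0' := PySem.Int.mod (t0 + q * t1) 65537
      if x' = 1 then PySem.Int.band t0' 65535
      else
        let q2 := PySem.Int.floordiv y x'
        let y' := PySem.Int.mod y x'
        let t1' := PySem.Int.mod (t1 + q2 * t0') 65537
        ideaLoop fuel x' y' t0' t1'
    else PySem.Int.band (65537 - t1) 65535

def idea_mul_inverse_py (x : Int) : Int :=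
  let x1 := PySem.Int.band x 65535
  if x1 ≤ 1 then x1
  else
    let t1 := PySem.Int.floordiv 65537 x1
    let y := PySem.Int.mod 65537 x1
    if y = 1 then PySem.Int.band (65537 - t1) 65535
    else ideaLoop 65536 x1 y 1 t1

-- ===== PORT B =====
def idea_mul_inverse_py_alt (x : Int) : Int :=
  PySem.Int.band (PySem.Int.powMod (PySem.Int.band x 65535) 65535 65537) 65535

-- ===== PRECONDITION & SPEC =====
def Spec_idea_mul_inverse_py (x : Int) (out : Int) : Prop := out = idea_mul_inverse_py_alt x
instance (x : Int) (out : Int) : Decidable (Spec_idea_mul_inverse_py x out) := by unfold Spec_idea_mul_inverse_py; infer_instance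

-- ===== CLAIM (what is proved, stated in full; the proofs are below) =====
def Claim_equal_idea_mul_inverse_py : Prop := ∀ (x : Int), Dom_idea_mul_inverse_py x → Spec_idea_mul_inverse_py x (idea_mul_inverse_py x)

-- ===== LEMMAS AND PROOFS =====

-- Python's z & 0xFFFF is reduction mod 2^16, for every integer (two's-complement `&`).
theorem band_mask (z : Int) : PySem.Int.band z 65535 = z % 65536 := by
  unfold PySem.Int.band
  by_cases h : 0 ≤ z
  · simp only [h, if_true, if_pos (by norm_num : (0:Int) ≤ 65535)]
    have h65 : Int.toNat 65535 = 65535 := rfl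
    rw [h65]
    have hmod := Nat.and_two_pow_sub_one_eq_mod z.toNat 16
    norm_num at hmod
    rw [hmod]
    omega
  · simp only [h, if_false, if_pos (by norm_num : (0:Int) ≤ 65535)]
    have h65 : Int.toNat 65535 = 65535 := rfl
    rw [h65]
    set n := (-z - 1).toNat with hn2
    have hcomm : 65535 &&& n = n &&& 65535 := Nat.and_comm _ _
    have hmod := Nat.and_two_pow_sub_one_eq_mod n 16
    norm_num at hmod
    rw [hcomm, hmod]
    omega

-- Uniqueness of the residue r ∈ [0, 65537) with r*a ≡ 1 (mod 65537).
theorem inverse_unique (a r1 r2 : Int) (h1lo : 0 ≤ r1) (h1hi : r1 < 65537)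
    (h2lo : 0 ≤ r2) (h2hi : r2 < 65537)
    (h1 : (r1 * a) % 65537 = 1) (h2 : (r2 * a) % 65537 = 1) : r1 = r2 := by
  have m1 : r1 * a ≡ 1 [ZMOD 65537] := by unfold Int.ModEq; omega
  have m2 : r2 * a ≡ 1 [ZMOD 65537] := by unfold Int.ModEq; omega
  have key : r1 ≡ r2 [ZMOD 65537] := by
    calc r1 ≡ r1 * (r2 * a) [ZMOD 65537] := by
              have hm := m2.mul_left r1; simpa using hm.symm
      _ = r2 * (r1 * a) := by ring
      _ ≡ r2 * 1 [ZMOD 65537] := m1.mul_left r2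
      _ = r2 := by ring
  unfold Int.ModEq at key
  omega

-- Fermat: for 1 ≤ a < 65537, (a^65535 % 65537) * a ≡ 1 (mod 65537), since 65537 is prime.
theorem fermat_inv (a : Int) (hlo : 1 ≤ a) (hhi : a < 65537) :
    ((a ^ 65535 % 65537) * a) % 65537 = 1 := by
  haveI : Fact (Nat.Prime 65537) := ⟨by norm_num⟩
  have hnd : ¬ ((65537:Int) ∣ a) := by
    intro h; rcases h with ⟨k, hk⟩
    nlinarith [mul_le_mul_of_nonneg_left (show (1:Int) ≤ k from by nlinarith) (show (0:Int) ≤ 65537 from by norm_num)]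
  have hne : (a : ZMod 65537) ≠ 0 := by
    rw [Ne, ZMod.intCast_zmod_eq_zero_iff_dvd]; exact_mod_cast hnd
  have hf := ZMod.pow_card_sub_one_eq_one hne
  norm_num at hf
  have hcast : ((a ^ 65536 : Int) : ZMod 65537) = ((1 : Int) : ZMod 65537) := by push_cast; simp [hf]
  have hmod : a ^ 65536 ≡ 1 [ZMOD 65537] := (ZMod.intCast_eq_intCast_iff _ _ _).mp hcast
  unfold Int.ModEq at hmod
  calc ((a ^ 65535 % 65537) * a) % 65537 = (a ^ 65535 * a) % 65537 := by
        rw [Int.mul_emod, Int.emod_emod_of_dvd _ dvd_rfl, ← Int.mul_emod]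
    _ = a ^ 65536 % 65537 := by ring_nf
    _ = 1 := by omega

-- A residue r with r*a ≡ 1 (mod 65537) is neither 0 nor 65536 when 2 ≤ a ≤ 65535.
theorem inv_bounds (a r : Int) (ha2 : 2 ≤ a) (ha : a ≤ 65535)
    (hlo : 0 ≤ r) (hhi : r < 65537) (h : (r * a) % 65537 = 1) :
    1 ≤ r ∧ r ≤ 65535 := by
  constructor
  · by_contra hc
    have hr0 : r = 0 := by omega
    subst hr0; simp at h
  · by_contra hc
    have hr : r = 65536 := by omega
    subst hr; omega

theorem modeq_emod (u : Int) : u % 65537 ≡ u [ZMOD 65537] := Int.emod_emod u 65537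

-- Invariant of A's extended-Euclidean loop: it returns the inverse of a modulo 65537.
theorem ideaLoop_spec : ∀ (fuel : Nat) (a x y t0 t1 : Int),
    2 ≤ a → a ≤ 65535 →
    1 ≤ y → y < x →
    Int.gcd x y = 1 →
    0 ≤ t0 → t0 < 65537 → 0 ≤ t1 → t1 < 65537 →
    (t0 * a) % 65537 = x % 65537 →
    (((65537 - t1) * a)) % 65537 = y % 65537 →
    x.toNat ≤ fuel →
    (ideaLoop fuel x y t0 t1 * a) % 65537 = 1 ∧
      1 ≤ ideaLoop fuel x y t0 t1 ∧ ideaLoop fuel x y t0 t1 ≤ 65535 := by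
  intro fuel
  induction fuel with
  | zero => intro a x y t0 t1 _ _ hy hyx _ _ _ _ _ _ _ hfuel; omega
  | succ fuel ih =>
    intro a x y t0 t1 ha2 ha hy hyx hg ht0lo ht0hi ht1lo ht1hi inv0 inv1 hfuel
    have hmodpos : (0:Int) < 65537 := by norm_num
    by_cases hy1 : y = 1
    · -- exit branch: return (0x10001 - t1) & 0xFFFF
      subst hy1
      simp only [ideaLoop, ne_eq, not_true_eq_false, if_false, band_mask]
      have hs1 : ((65537 - t1) * a) % 65537 = 1 := by
        rw [inv1]; norm_num
      have ht1pos : 1 ≤ t1 := by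
        by_contra hc
        have ht1z : t1 = 0 := by omega
        rw [ht1z] at hs1; omega
      have hb := inv_bounds a (65537 - t1) ha2 ha (by omega) (by omega) hs1
      have heq : (65537 - t1) % 65536 = 65537 - t1 := by omega
      rw [heq]
      exact ⟨hs1, hb⟩
    · -- loop body
      have hy2 : 2 ≤ y := by omega
      have hypos : (0:Int) < y := by omega
      simp only [ideaLoop, ne_eq, hy1, not_false_eq_true, if_true,
        PySem.Int.floordiv_eq_ediv_of_pos hypos, PySem.Int.mod_eq_emod_of_pos hypos,
        PySem.Int.mod_eq_emod_of_pos hmodpos]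
      have hx'lo : 0 ≤ x % y := Int.emod_nonneg _ (by omega)
      have hx'lt : x % y < y := Int.emod_lt_of_pos _ hypos
      have hgx' : Int.gcd (x % y) y = 1 := by rw [Int.gcd_emod]; exact hg
      have hx'ne : x % y ≠ 0 := by
        intro h0; rw [h0] at hgx'
        simp [Int.gcd] at hgx'; omega
      have ht0'lo : 0 ≤ (t0 + x / y * t1) % 65537 := Int.emod_nonneg _ (by norm_num)
      have ht0'hi : (t0 + x / y * t1) % 65537 < 65537 := Int.emod_lt_of_pos _ hmodpos
      have hta : t1 * a ≡ -y [ZMOD 65537] := by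
        have h1 : (65537 - t1) * a ≡ y [ZMOD 65537] := inv1
        calc t1 * a = -((65537 - t1) * a) + 65537 * a := by ring
          _ ≡ -y + 0 [ZMOD 65537] := Int.ModEq.add h1.neg ((Int.modEq_zero_iff_dvd).mpr ⟨a, rfl⟩)
          _ = -y := by ring
      have hmain : ((t0 + x / y * t1) % 65537) * a ≡ x % y [ZMOD 65537] := by
        calc ((t0 + x / y * t1) % 65537) * a
            ≡ (t0 + x / y * t1) * a [ZMOD 65537] := (modeq_emod _).mul_right a
          _ = t0 * a + (x / y) * (t1 * a) := by ring
          _ ≡ x + (x / y) * (-y) [ZMOD 65537] := Int.ModEq.add inv0 (hta.mul_left _)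
          _ = x - y * (x / y) := by ring
          _ = x % y := by rw [Int.emod_def x y]
      by_cases hx1 : x % y = 1
      · rw [if_pos hx1, band_mask]
        have h1 : (((t0 + x / y * t1) % 65537) * a) % 65537 = 1 := by
          have hm := hmain; unfold Int.ModEq at hm; rw [hx1] at hm; omega
        have hb := inv_bounds a _ ha2 ha ht0'lo ht0'hi h1
        have heq : ((t0 + x / y * t1) % 65537) % 65536 = (t0 + x / y * t1) % 65537 := by omega
        rw [heq]
        exact ⟨h1, hb⟩
      · rw [if_neg hx1]
        have hx'2 : 2 ≤ x % y := by omega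
        have hx'pos : (0:Int) < x % y := by omega
        rw [PySem.Int.floordiv_eq_ediv_of_pos hx'pos, PySem.Int.mod_eq_emod_of_pos hx'pos]
        have ht1'lo : 0 ≤ (t1 + y / (x % y) * ((t0 + x / y * t1) % 65537)) % 65537 := Int.emod_nonneg _ (by norm_num)
        have ht1'hi : (t1 + y / (x % y) * ((t0 + x / y * t1) % 65537)) % 65537 < 65537 := Int.emod_lt_of_pos _ hmodpos
        have hy'lo : 0 ≤ y % (x % y) := Int.emod_nonneg _ (by omega)
        have hy'lt : y % (x % y) < x % y := Int.emod_lt_of_pos _ hx'pos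
        have hgy' : Int.gcd (x % y) (y % (x % y)) = 1 := by
          rw [Int.gcd_comm, Int.gcd_emod, Int.gcd_comm]
          exact hgx'
        have hy'ne : y % (x % y) ≠ 0 := by
          intro h0; rw [h0] at hgy'
          simp [Int.gcd] at hgy'; omega
        have hinv1' : ((65537 - (t1 + y / (x % y) * ((t0 + x / y * t1) % 65537)) % 65537) * a) % 65537 = (y % (x % y)) % 65537 := by
          calc (65537 - (t1 + y / (x % y) * ((t0 + x / y * t1) % 65537)) % 65537) * a
              = -(((t1 + y / (x % y) * ((t0 + x / y * t1) % 65537)) % 65537) * a) + 65537 * a := by ring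
            _ ≡ -((t1 + y / (x % y) * ((t0 + x / y * t1) % 65537)) * a) + 0 [ZMOD 65537] :=
                Int.ModEq.add (((modeq_emod _).mul_right a).neg) ((Int.modEq_zero_iff_dvd).mpr ⟨a, rfl⟩)
            _ = -(t1 * a) + (y / (x % y)) * (-(((t0 + x / y * t1) % 65537) * a)) := by ring
            _ ≡ y + (y / (x % y)) * (-(x % y)) [ZMOD 65537] :=
                Int.ModEq.add (by simpa using hta.neg) ((hmain.neg).mul_left _)
            _ = y - (x % y) * (y / (x % y)) := by ring
            _ = y % (x % y) := by rw [Int.emod_def y (x % y)]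
        exact ih a (x % y) (y % (x % y)) _ _ ha2 ha (by omega) hy'lt hgy' ht0'lo ht0'hi ht1'lo ht1'hi
          (by have hm := hmain; unfold Int.ModEq at hm; exact hm) hinv1' (by omega)

-- Both sides as a function of the already-masked value a = x & 0xFFFF.
theorem core (a : Int) (h0 : 0 ≤ a) (h1 : a < 65536) :
    (if a ≤ 1 then a
     else
      let t1 := PySem.Int.floordiv 65537 a
      let y := PySem.Int.mod 65537 a
      if y = 1 then PySem.Int.band (65537 - t1) 65535
      else ideaLoop 65536 a y 1 t1)
    = PySem.Int.band (PySem.Int.powMod a 65535 65537) 65535 := by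
  rw [PySem.Int.powMod_eq_emod a 65535 (by norm_num : (0:Int) < 65537), band_mask]
  by_cases ha1 : a ≤ 1
  · rw [if_pos ha1]
    have : a = 0 ∨ a = 1 := by omega
    rcases this with h | h <;> subst h <;> norm_num
  · rw [if_neg ha1]
    have ha2 : 2 ≤ a := by omega
    have ha : a ≤ 65535 := by omega
    have hapos : (0:Int) < a := by omega
    -- the Fermat-side inverse
    have hrlo : 0 ≤ a ^ 65535 % 65537 := Int.emod_nonneg _ (by norm_num)
    have hrhi : a ^ 65535 % 65537 < 65537 := Int.emod_lt_of_pos _ (by norm_num)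
    have hfer := fermat_inv a (by omega) (by omega)
    have hrb := inv_bounds a _ ha2 ha hrlo hrhi hfer
    have hrid : a ^ 65535 % 65537 % 65536 = a ^ 65535 % 65537 := by omega
    rw [hrid]
    simp only [PySem.Int.floordiv_eq_ediv_of_pos hapos, PySem.Int.mod_eq_emod_of_pos hapos]
    -- the Euclid-side entry facts
    have hylo : 0 ≤ 65537 % a := Int.emod_nonneg _ (by omega)
    have hylt : 65537 % a < a := Int.emod_lt_of_pos _ hapos
    have hqlo : 0 ≤ 65537 / a := Int.ediv_nonneg (by norm_num) (by omega)
    have hmd : 65537 % a = 65537 - a * (65537 / a) := Int.emod_def 65537 a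
    have hqhi : 65537 / a < 65537 := by nlinarith
    have hqpos : 1 ≤ 65537 / a := by nlinarith
    have hga : Int.gcd a (65537 % a) = 1 := by
      rw [Int.gcd_comm, Int.gcd_emod]
      have hnd : ¬ (65537 ∣ a.natAbs) := by
        intro hd
        have := Nat.le_of_dvd (by omega) hd
        omega
      have := (Nat.Prime.coprime_iff_not_dvd (by norm_num : Nat.Prime 65537)).mpr hnd
      simpa [Int.gcd] using this
    have hinv1 : ((65537 - 65537 / a) * a) % 65537 = (65537 % a) % 65537 := by
      calc (65537 - 65537 / a) * a
          = 65537 * (a - 1) + (65537 - a * (65537 / a)) := by ring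
        _ = 65537 * (a - 1) + 65537 % a := by rw [← hmd]
        _ ≡ 0 + 65537 % a [ZMOD 65537] :=
            Int.ModEq.add ((Int.modEq_zero_iff_dvd).mpr ⟨a - 1, rfl⟩) (Int.ModEq.refl _)
        _ = 65537 % a := by ring
    by_cases hy1 : 65537 % a = 1
    · rw [if_pos hy1, band_mask]
      have hs1 : ((65537 - 65537 / a) * a) % 65537 = 1 := by
        rw [hinv1, hy1]; norm_num
      have hsb := inv_bounds a (65537 - 65537 / a) ha2 ha (by omega) (by omega) hs1
      have heq : (65537 - 65537 / a) % 65536 = 65537 - 65537 / a := by omega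
      rw [heq]
      exact inverse_unique a _ _ (by omega) (by omega) hrlo hrhi hs1 hfer
    · rw [if_neg hy1]
      have hyne : 65537 % a ≠ 0 := by
        intro h0; rw [h0] at hga
        simp [Int.gcd] at hga; omega
      have htrip := ideaLoop_spec 65536 a a (65537 % a) 1 (65537 / a) ha2 ha (by omega) hylt hga
        (by norm_num) (by norm_num) (by omega) (by omega)
        (by ring_nf) hinv1 (by omega)
      exact inverse_unique a _ _ (by omega) (by omega) hrlo hrhi htrip.1 hfer

-- ===== VERDICT (by name: the statement is the Claim_ definition above) =====
theorem idea_mul_inverse_py_spec : Claim_equal_idea_mul_inverse_py := by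
  intro x _
  unfold Spec_idea_mul_inverse_py idea_mul_inverse_py idea_mul_inverse_py_alt
  exact core (PySem.Int.band x 65535)
    (by rw [band_mask]; exact Int.emod_nonneg _ (by norm_num))
    (by rw [band_mask]; exact Int.emod_lt_of_pos _ (by norm_num))
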